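-- pv_equiv track=rewrite | github.com/cheubuses/OUK-AI-Training-Repo-2025 | backend/helpers/git_tools.py | prioritise_files
-- ===== SOURCE A (Python) =====
-- def prioritise_files(file_list):
-- 	# simple heuristic: look for common entry points first
-- 	priority = []
-- 	entry_candidates = ['main.py', 'app.py', 'server.py', 'index.js', 'main.jac']
-- 	for e in entry_candidates:
-- 		for f in file_list:
-- 			if f.endswith(e):
-- 				priority.append(f)
-- 	# append rest
-- 	for f in file_list:
-- 		if f not in priority:
-- 			priority.append(f)
-- 	return priority
-- ===== SOURCE B (Python) =====
-- def prioritise_files(file_list):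
--     entry_candidates = ['main.py', 'app.py', 'server.py', 'index.js', 'main.jac']
--     # single pass: route each file into the bucket of every candidate suffix it
--     # matches; non-matching files go to 'others', deduplicated (first occurrence).
--     buckets = [[] for _ in entry_candidates]
--     others = []
--     seen = set()
--     for f in file_list:
--         hits = [i for i, e in enumerate(entry_candidates) if f.endswith(e)]
--         for i in hits:
--             buckets[i].append(f)
--         if not hits and f not in seen:
--             seen.add(f)
--             others.append(f)
--     result = []
--     for b in buckets:
--         result += b
--     return result + others
-- ===== Notes on version B (the rewrite author's own statement) =====
-- stated objective: faster
-- what changed: A rescans file_list once per candidate and then dedups the rest with a quadratic list-membership test; B does a single pass routing each file into per-candidate buckets and dedups the non-matching rest with a seen-set, then concatenates buckets in candidate order followed by the rest.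
import Mathlib
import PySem

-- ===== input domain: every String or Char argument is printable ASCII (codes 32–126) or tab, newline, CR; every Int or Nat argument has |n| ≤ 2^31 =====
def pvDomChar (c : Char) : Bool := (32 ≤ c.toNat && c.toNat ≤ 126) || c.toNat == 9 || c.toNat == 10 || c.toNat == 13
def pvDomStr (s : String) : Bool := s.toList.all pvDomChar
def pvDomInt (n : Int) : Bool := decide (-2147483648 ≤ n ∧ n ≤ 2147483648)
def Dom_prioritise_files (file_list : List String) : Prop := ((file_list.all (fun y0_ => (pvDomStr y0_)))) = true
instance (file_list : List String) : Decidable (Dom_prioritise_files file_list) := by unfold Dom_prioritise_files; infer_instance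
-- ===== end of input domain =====

-- B replaces A's candidate-by-candidate rescans of file_list (and the list-membership rescan
-- for the rest) by a single pass routing each file into per-candidate buckets, with the
-- non-matching files deduplicated through a seen-set; objective: faster single pass.

-- ===== PORT A =====
def pfCands : List String := ["main.py", "app.py", "server.py", "index.js", "main.jac"]

def prioritise_files (file_list : List String) : List String :=
  let priority := pfCands.foldl (fun pr e =>
    file_list.foldl (fun pr f => if PySem.Str.endswith f e then pr ++ [f] else pr) pr) []
  file_list.foldl (fun pr f => if pr.contains f then pr else pr ++ [f]) priority

-- ===== PORT B =====
def pfCandsAlt : List String := ["main.py", "app.py", "server.py", "index.js", "main.jac"]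

-- hits = [i for i, e in enumerate(entry_candidates) if f.endswith(e)]
def pfHits (f : String) : List Int :=
  ((PySem.List.enumerate pfCandsAlt).filter (fun ie => PySem.Str.endswith f ie.2)).map (fun ie => ie.1)

structure PFSt where
  buckets : List (List String)
  others : List String
  seen : PySem.Set String
deriving Repr, DecidableEq

-- one iteration of B's 'for f in file_list' loop ('buckets[i].append(f)' = read-modify-write at i)
def pfStep (st : PFSt) (f : String) : PFSt :=
  let hits := pfHits f
  let buckets := hits.foldl
    (fun bs i => PySem.List.pySetD bs i ((PySem.List.pyGetD bs i []) ++ [f])) st.buckets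
  if hits.isEmpty && !(PySem.Set.contains st.seen f) then
    ⟨buckets, st.others ++ [f], PySem.Set.add st.seen f⟩
  else
    ⟨buckets, st.others, st.seen⟩

def prioritise_files_alt (file_list : List String) : List String :=
  let st := file_list.foldl pfStep ⟨pfCandsAlt.map (fun _ => []), [], PySem.Set.empty⟩
  let result := st.buckets.foldl (fun r b => r ++ b) []
  result ++ st.others

-- ===== PRECONDITION & SPEC =====
def Spec_prioritise_files (file_list : List String) (out : List String) : Prop := out = prioritise_files_alt file_list
instance (file_list : List String) (out : List String) : Decidable (Spec_prioritise_files file_list out) := by unfold Spec_prioritise_files; infer_instance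

-- ===== CLAIM (what is proved, stated in full; the proofs are below) =====
def Claim_equal_prioritise_files : Prop := ∀ (file_list : List String), Dom_prioritise_files file_list → Spec_prioritise_files file_list (prioritise_files file_list)

-- ===== LEMMAS AND PROOFS =====

-- the others/seen component of B's loop, isolated
def pfOStep (os : List String × PySem.Set String) (f : String) : List String × PySem.Set String :=
  if (pfHits f).isEmpty && !(PySem.Set.contains os.2 f) then (os.1 ++ [f], PySem.Set.add os.2 f) else os

lemma pfHits_eq (f : String) :
    pfHits f = (if PySem.Str.endswith f "main.py" then [(0 : Int)] else []) ++
               (if PySem.Str.endswith f "app.py" then [1] else []) ++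
               (if PySem.Str.endswith f "server.py" then [2] else []) ++
               (if PySem.Str.endswith f "index.js" then [3] else []) ++
               (if PySem.Str.endswith f "main.jac" then [4] else []) := by
  simp only [pfHits, pfCandsAlt, PySem.List.enumerate_cons, PySem.List.enumerate_nil,
    List.filter_cons, List.filter_nil]
  split_ifs <;> simp

lemma pfStep_buckets (b0 b1 b2 b3 b4 : List String) (f : String) :
    (pfHits f).foldl
      (fun bs i => PySem.List.pySetD bs i ((PySem.List.pyGetD bs i []) ++ [f]))
      [b0, b1, b2, b3, b4] =
      [b0 ++ (if PySem.Str.endswith f "main.py" then [f] else []),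
       b1 ++ (if PySem.Str.endswith f "app.py" then [f] else []),
       b2 ++ (if PySem.Str.endswith f "server.py" then [f] else []),
       b3 ++ (if PySem.Str.endswith f "index.js" then [f] else []),
       b4 ++ (if PySem.Str.endswith f "main.jac" then [f] else [])] := by
  rw [pfHits_eq]
  split_ifs <;>
    simp [PySem.List.pySetD, PySem.List.pySet?, PySem.List.pyGetD, PySem.List.pyGet?,
      PySem.List.pyIdx?]

lemma pfHits_isEmpty (f : String) :
    (pfHits f).isEmpty = (!(PySem.Str.endswith f "main.py") && !(PySem.Str.endswith f "app.py") &&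
      !(PySem.Str.endswith f "server.py") && !(PySem.Str.endswith f "index.js") &&
      !(PySem.Str.endswith f "main.jac")) := by
  rw [pfHits_eq]
  split_ifs <;> simp_all

lemma pfStep_eq (b0 b1 b2 b3 b4 : List String) (o : List String) (s : PySem.Set String)
    (f : String) :
    pfStep ⟨[b0, b1, b2, b3, b4], o, s⟩ f =
      ⟨[b0 ++ (if PySem.Str.endswith f "main.py" then [f] else []),
        b1 ++ (if PySem.Str.endswith f "app.py" then [f] else []),
        b2 ++ (if PySem.Str.endswith f "server.py" then [f] else []),
        b3 ++ (if PySem.Str.endswith f "index.js" then [f] else []),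
        b4 ++ (if PySem.Str.endswith f "main.jac" then [f] else [])],
       (pfOStep (o, s) f).1, (pfOStep (o, s) f).2⟩ := by
  simp only [pfStep, pfStep_buckets, pfOStep]
  cases ((pfHits f).isEmpty && !(PySem.Set.contains s f)) <;> simp

lemma pfFold_eq (l : List String) :
    ∀ (b0 b1 b2 b3 b4 o : List String) (s : PySem.Set String),
    l.foldl pfStep ⟨[b0, b1, b2, b3, b4], o, s⟩ =
      ⟨[b0 ++ l.filter (fun f => PySem.Str.endswith f "main.py"),
        b1 ++ l.filter (fun f => PySem.Str.endswith f "app.py"),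
        b2 ++ l.filter (fun f => PySem.Str.endswith f "server.py"),
        b3 ++ l.filter (fun f => PySem.Str.endswith f "index.js"),
        b4 ++ l.filter (fun f => PySem.Str.endswith f "main.jac")],
       (l.foldl pfOStep (o, s)).1, (l.foldl pfOStep (o, s)).2⟩ := by
  induction l with
  | nil => intro b0 b1 b2 b3 b4 o s; simp
  | cons f t ih =>
    intro b0 b1 b2 b3 b4 o s
    rw [List.foldl_cons, List.foldl_cons, pfStep_eq, ih]
    simp only [PFSt.mk.injEq, Prod.mk.eta, List.filter_cons, List.cons.injEq, and_true]
    split_ifs <;> simp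

lemma restFold_eq (F : List String) (l : List String)
    (hF : ∀ f ∈ l, F.contains f = !(pfHits f).isEmpty) :
    ∀ (o : List String) (s : PySem.Set String),
    (∀ f, PySem.Set.contains s f = o.contains f) →
    l.foldl (fun pr f => if pr.contains f then pr else pr ++ [f]) (F ++ o) =
      F ++ (l.foldl pfOStep (o, s)).1 := by
  induction l with
  | nil => intro o s _; simp
  | cons f t ih =>
    intro o s hs
    have hf : F.contains f = !(pfHits f).isEmpty := hF f (List.mem_cons_self)
    have ht : ∀ g ∈ t, F.contains g = !(pfHits g).isEmpty := fun g hg => hF g (List.mem_cons_of_mem _ hg)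
    rw [List.foldl_cons, List.foldl_cons]
    have hB : pfOStep (o, s) f =
        if ((pfHits f).isEmpty && !(o.contains f)) = true then (o ++ [f], PySem.Set.add s f)
        else (o, s) := by
      rw [pfOStep, hs]
    have hA : (F ++ o).contains f = (!(pfHits f).isEmpty || o.contains f) := by
      rw [List.contains_append, hf]
    cases hemp : (pfHits f).isEmpty <;> cases hmem : o.contains f <;>
      rw [hemp, hmem] at hA hB <;> rw [hB] <;> simp only [hA]
    · -- f ends with some candidate (already in F), not in others: both sides skip
      simpa using ih ht o s hs
    · -- f ends with some candidate, also in others: both sides skip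
      simpa using ih ht o s hs
    · -- f matches no candidate and was not seen yet: both sides append f
      have hs' : ∀ g, PySem.Set.contains (PySem.Set.add s f) g = (o ++ [f]).contains g := by
        intro g
        have hsf : PySem.Set.contains s f = false := by rw [hs, hmem]
        have hfs : f ∉ s := by simpa using hsf
        have hgs : g ∈ s ↔ g ∈ o := by simpa using hs g
        simp [PySem.Set.add, PySem.Set.contains, hfs, hgs]
      simpa [List.append_assoc] using ih ht (o ++ [f]) (PySem.Set.add s f) hs'
    · -- f matches no candidate but is already in others: both sides skip
      simpa using ih ht o s hs

lemma priorityF_eq (file_list : List String) :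
    pfCands.foldl (fun pr e =>
        file_list.foldl (fun pr f => if PySem.Str.endswith f e then pr ++ [f] else pr) pr) [] =
      file_list.filter (fun f => PySem.Str.endswith f "main.py") ++
      file_list.filter (fun f => PySem.Str.endswith f "app.py") ++
      file_list.filter (fun f => PySem.Str.endswith f "server.py") ++
      file_list.filter (fun f => PySem.Str.endswith f "index.js") ++
      file_list.filter (fun f => PySem.Str.endswith f "main.jac") := by
  simp only [pfCands, List.foldl_cons, List.foldl_nil]
  rw [PySem.List.foldl_append_if_eq_filter (fun f => PySem.Str.endswith f "main.py"),
      PySem.List.foldl_append_if_eq_filter (fun f => PySem.Str.endswith f "app.py"),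
      PySem.List.foldl_append_if_eq_filter (fun f => PySem.Str.endswith f "server.py"),
      PySem.List.foldl_append_if_eq_filter (fun f => PySem.Str.endswith f "index.js"),
      PySem.List.foldl_append_if_eq_filter (fun f => PySem.Str.endswith f "main.jac")]
  simp [List.append_assoc]

lemma F_contains (file_list : List String) (f : String) (hf : f ∈ file_list) :
    (file_list.filter (fun f => PySem.Str.endswith f "main.py") ++
     file_list.filter (fun f => PySem.Str.endswith f "app.py") ++
     file_list.filter (fun f => PySem.Str.endswith f "server.py") ++
     file_list.filter (fun f => PySem.Str.endswith f "index.js") ++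
     file_list.filter (fun f => PySem.Str.endswith f "main.jac")).contains f =
      !(pfHits f).isEmpty := by
  rw [pfHits_isEmpty]
  simp [List.contains_eq_mem, List.mem_filter, hf, Bool.or_assoc]

-- ===== VERDICT (by name: the statement is the Claim_ definition above) =====
theorem prioritise_files_spec : Claim_equal_prioritise_files := by
  intro file_list _
  unfold Spec_prioritise_files
  simp only [prioritise_files, prioritise_files_alt]
  rw [priorityF_eq]
  rw [show (pfCandsAlt.map (fun _ => ([] : List String))) = [[], [], [], [], []] from rfl]
  rw [pfFold_eq]
  have hrest := restFold_eq
    (file_list.filter (fun f => PySem.Str.endswith f "main.py") ++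
     file_list.filter (fun f => PySem.Str.endswith f "app.py") ++
     file_list.filter (fun f => PySem.Str.endswith f "server.py") ++
     file_list.filter (fun f => PySem.Str.endswith f "index.js") ++
     file_list.filter (fun f => PySem.Str.endswith f "main.jac"))
    file_list (fun f hf => F_contains file_list f hf) [] PySem.Set.empty
    (fun g => rfl)
  rw [List.append_nil] at hrest
  rw [hrest]
  simp [List.append_assoc]
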